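-- pv_equiv track=rewrite | github.com/Stunkz/ueProjet | main.py | pion_deplacable
-- ===== SOURCE A (Python) =====
-- def case_vide(coord, grille):
--     return grille[coord[0]][coord[1]] == 0
--
-- def calcul_distance(coord_depart, coord_arrivee):
--     return (coord_arrivee[0] - coord_depart[0]), (coord_arrivee[1] - coord_depart[1])  # le [0] et [1] servent pour donner les coord en x et y
--
-- def distance_pour_deplacement(coord_depart, coord_arrivee):
--     distance = calcul_distance(coord_depart, coord_arrivee)
--     x = distance[0]
--     y = distance[1]
--     return ((x==1)and(y==0)) or ((x==0)and(y==1)) or ((x==-1)and(y==0)) or ((x==0)and(y==-1))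
--
-- def pion_deplacable(grille, coord_depart):
--     for i in range(len(grille)):
--         for j in range(len(grille)):
--             coord_arrivee = (i, j)
--             calcul_distance(coord_depart, coord_arrivee)
--             if case_vide(coord_arrivee, grille) and distance_pour_deplacement(coord_depart, coord_arrivee):
--                 return True
--     return False
-- ===== SOURCE B (Python) =====
-- def pion_deplacable(grille, coord_depart):
--     n = len(grille)
--     x, y = coord_depart
--     for dx, dy in ((1, 0), (-1, 0), (0, 1), (0, -1)):
--         i, j = x + dx, y + dy
--         if 0 <= i < n and 0 <= j < n and grille[i][j] == 0:
--             return True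
--     return False
-- ===== Notes on version B (the rewrite author's own statement) =====
-- stated objective: faster
-- what changed: Instead of scanning every cell of the n x n index range and testing whether it is an empty orthogonal neighbour, B directly tests the 4 orthogonal neighbour cells of coord_depart with bounds checks.
-- outside the precondition, e.g. on pion_deplacable([[0, 1], [1]], (0, 1)): A returns True, B raises IndexError
import Mathlib
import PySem

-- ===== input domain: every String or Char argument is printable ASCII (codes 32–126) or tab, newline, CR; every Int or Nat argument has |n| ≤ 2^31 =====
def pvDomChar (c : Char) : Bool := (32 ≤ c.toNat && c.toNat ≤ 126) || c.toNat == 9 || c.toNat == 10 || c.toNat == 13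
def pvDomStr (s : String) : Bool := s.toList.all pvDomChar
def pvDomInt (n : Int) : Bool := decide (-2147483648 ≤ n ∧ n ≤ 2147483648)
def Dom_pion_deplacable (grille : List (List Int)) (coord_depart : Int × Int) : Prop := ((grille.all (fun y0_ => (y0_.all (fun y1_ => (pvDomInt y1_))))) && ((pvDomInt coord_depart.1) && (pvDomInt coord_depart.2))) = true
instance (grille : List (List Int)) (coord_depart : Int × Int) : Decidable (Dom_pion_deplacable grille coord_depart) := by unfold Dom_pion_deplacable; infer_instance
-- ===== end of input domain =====

-- B replaces A's O(n^2) scan of the whole n×n index range by a direct O(1) test of the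
-- 4 orthogonal neighbour cells of coord_depart with bounds checks.

-- ===== PORT A =====
def case_vide (coord : Int × Int) (grille : List (List Int)) : Bool :=
  ((PySem.List.pyGet? grille coord.1).bind (fun row => PySem.List.pyGet? row coord.2)) == some 0

def calcul_distance (coord_depart coord_arrivee : Int × Int) : Int × Int :=
  (coord_arrivee.1 - coord_depart.1, coord_arrivee.2 - coord_depart.2)

def distance_pour_deplacement (coord_depart coord_arrivee : Int × Int) : Bool :=
  let distance := calcul_distance coord_depart coord_arrivee
  let x := distance.1
  let y := distance.2
  ((x == 1) && (y == 0)) || ((x == 0) && (y == 1)) || ((x == -1) && (y == 0)) || ((x == 0) && (y == -1))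

-- A's bare `calcul_distance(...)` statement in the loop body discards its result; it has no effect.
def pion_deplacable (grille : List (List Int)) (coord_depart : Int × Int) : Bool :=
  (PySem.List.pyRange 0 (grille.length : Int) 1).any (fun i =>
    (PySem.List.pyRange 0 (grille.length : Int) 1).any (fun j =>
      case_vide (i, j) grille && distance_pour_deplacement coord_depart (i, j)))

-- ===== PORT B =====
def cellEmpty (grille : List (List Int)) (i j : Int) : Bool :=
  ((PySem.List.pyGet? grille i).bind (fun row => PySem.List.pyGet? row j)) == some 0

def pion_deplacable_alt (grille : List (List Int)) (coord_depart : Int × Int) : Bool :=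
  let n : Int := grille.length
  let x := coord_depart.1
  let y := coord_depart.2
  [((1 : Int), (0 : Int)), (-1, 0), (0, 1), (0, -1)].any (fun d =>
    let i := x + d.1
    let j := y + d.2
    decide (0 ≤ i) && decide (i < n) && decide (0 ≤ j) && decide (j < n) && cellEmpty grille i j)

-- ===== PRECONDITION & SPEC =====
-- Pre_ excludes grids with a row shorter than len(grille): A's scan indexes grille[i][j] for all
-- i, j < len(grille) and raises IndexError on such a row (unless it luckily returns first, in which
-- case B's neighbour indexing raises there instead).
def Pre_pion_deplacable (grille : List (List Int)) (coord_depart : Int × Int) : Prop :=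
  ∀ row ∈ grille, grille.length ≤ row.length

instance (grille : List (List Int)) (coord_depart : Int × Int) : Decidable (Pre_pion_deplacable grille coord_depart) := by unfold Pre_pion_deplacable; infer_instance

def pvWitness_pion_deplacable : List (List Int) × (Int × Int) := ([[0, 1], [1, 1]], (1, 0))

def Spec_pion_deplacable (grille : List (List Int)) (coord_depart : Int × Int) (out : Bool) : Prop := out = pion_deplacable_alt grille coord_depart
instance (grille : List (List Int)) (coord_depart : Int × Int) (out : Bool) : Decidable (Spec_pion_deplacable grille coord_depart out) := by unfold Spec_pion_deplacable; infer_instance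

-- ===== CLAIM (what is proved, stated in full; the proofs are below) =====
def Claim_equal_pion_deplacable : Prop := ∀ (grille : List (List Int)) (coord_depart : Int × Int), Dom_pion_deplacable grille coord_depart → Pre_pion_deplacable grille coord_depart → Spec_pion_deplacable grille coord_depart (pion_deplacable grille coord_depart)

-- ===== LEMMAS AND PROOFS =====
theorem pion_main (grille : List (List Int)) (coord_depart : Int × Int) :
    pion_deplacable grille coord_depart = pion_deplacable_alt grille coord_depart := by
  obtain ⟨x, y⟩ := coord_depart
  rw [Bool.eq_iff_iff]
  simp only [pion_deplacable, pion_deplacable_alt, case_vide, cellEmpty,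
    distance_pour_deplacement, calcul_distance, List.any_eq_true,
    PySem.List.mem_pyRange_one, List.any_cons, List.any_nil,
    Bool.and_eq_true, Bool.or_eq_true, beq_iff_eq, decide_eq_true_eq, Bool.false_eq_true, or_false]
  constructor
  · rintro ⟨i, ⟨hi0, hin⟩, j, ⟨hj0, hjn⟩, hcell, ((⟨h1, h2⟩ | ⟨h1, h2⟩) | ⟨h1, h2⟩) | ⟨h1, h2⟩⟩
    · exact Or.inl (by
        rw [show x + 1 = i from by omega, show y + 0 = j from by omega]
        exact ⟨⟨⟨⟨hi0, hin⟩, hj0⟩, hjn⟩, hcell⟩)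
    · exact Or.inr (Or.inr (Or.inl (by
        rw [show x + 0 = i from by omega, show y + 1 = j from by omega]
        exact ⟨⟨⟨⟨hi0, hin⟩, hj0⟩, hjn⟩, hcell⟩)))
    · exact Or.inr (Or.inl (by
        rw [show x + -1 = i from by omega, show y + 0 = j from by omega]
        exact ⟨⟨⟨⟨hi0, hin⟩, hj0⟩, hjn⟩, hcell⟩))
    · exact Or.inr (Or.inr (Or.inr (by
        rw [show x + 0 = i from by omega, show y + -1 = j from by omega]
        exact ⟨⟨⟨⟨hi0, hin⟩, hj0⟩, hjn⟩, hcell⟩)))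
  · rintro (⟨⟨⟨⟨h1, h2⟩, h3⟩, h4⟩, hc⟩ | ⟨⟨⟨⟨h1, h2⟩, h3⟩, h4⟩, hc⟩ |
      ⟨⟨⟨⟨h1, h2⟩, h3⟩, h4⟩, hc⟩ | ⟨⟨⟨⟨h1, h2⟩, h3⟩, h4⟩, hc⟩)
    · exact ⟨x + 1, ⟨h1, h2⟩, y + 0, ⟨h3, h4⟩, hc, by omega⟩
    · exact ⟨x + -1, ⟨h1, h2⟩, y + 0, ⟨h3, h4⟩, hc, by omega⟩
    · exact ⟨x + 0, ⟨h1, h2⟩, y + 1, ⟨h3, h4⟩, hc, by omega⟩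
    · exact ⟨x + 0, ⟨h1, h2⟩, y + -1, ⟨h3, h4⟩, hc, by omega⟩

-- ===== VERDICT (by name: the statement is the Claim_ definition above) =====
theorem pion_deplacable_spec : Claim_equal_pion_deplacable := by
  intro g c _ _
  exact pion_main g c
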